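-- pv_equiv track=rewrite | github.com/map-research/AutoMLM | src/java_communication/lexical_analysis_helper.py | performTokenization
-- ===== SOURCE A (Python) =====
-- def performTokenization(label: str) -> list:
--     compunds = []
--     j = 0
--
--     for i, char in enumerate(label):
--         if char.isupper():
--             if i == 0:
--                 # compund part doesnt end here
--                 continue
--             else:
--                 if label[i-1].isupper():
--                     # compound part is an acronym
--                     continue
--                 else:
--                     # normal compund part
--                     compunds.append(label[j:i])
--                     j = i
--
--     # add last compund part
--     compunds.append(label[j:len(label)])
--
--     return compunds
-- ===== SOURCE B (Python) =====
-- def performTokenization(label: str) -> list: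
--     # Single pass building the parts directly (no index slicing): a new part
--     # starts at an uppercase char whose predecessor (= last char of the part
--     # under construction) is not uppercase.
--     parts = []
--     cur = ""
--     for ch in label:
--         if ch.isupper() and cur and not cur[-1].isupper():
--             parts.append(cur)
--             cur = ch
--         else:
--             cur += ch
--     parts.append(cur)
--     return parts
-- ===== Notes on version B (the rewrite author's own statement) =====
-- stated objective: alternative
-- what changed: B replaces A's index-and-slice scan (tracking a start index j and cutting label[j:i] slices) by a single accumulator pass that builds each compound part character by character, testing the boundary on the last character of the part under construction instead of indexing label[i-1].
import Mathlib
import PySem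

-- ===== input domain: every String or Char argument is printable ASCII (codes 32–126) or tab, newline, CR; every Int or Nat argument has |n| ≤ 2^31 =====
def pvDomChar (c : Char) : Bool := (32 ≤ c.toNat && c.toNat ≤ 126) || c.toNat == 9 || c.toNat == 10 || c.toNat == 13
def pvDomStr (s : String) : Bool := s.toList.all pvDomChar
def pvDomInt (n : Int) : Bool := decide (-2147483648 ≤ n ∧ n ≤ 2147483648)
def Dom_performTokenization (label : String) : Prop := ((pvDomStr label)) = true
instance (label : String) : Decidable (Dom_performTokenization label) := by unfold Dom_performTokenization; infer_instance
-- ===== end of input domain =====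

-- B builds each compound part character by character in one accumulator pass instead of
-- tracking a start index and slicing; same cost, different decomposition (objective: alternative).


-- ===== PORT A =====
-- one iteration of A's for-loop: state = (compunds, j); p = (i, char) from enumerate(label)
def pvStepA (cs : List Char) (s : List (List Char) × Int) (p : Int × Char) :
    List (List Char) × Int :=
  if PySem.Chars.isupper p.2 then
    if p.1 == 0 then s
    else if ((PySem.List.pyGet? cs (p.1 - 1)).map PySem.Chars.isupper).getD false then s
    else (s.1 ++ [PySem.List.slice cs (some s.2) (some p.1)], p.1)
  else s

def performTokenization (label : String) : List String :=
  let cs := label.toList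
  let st := (PySem.List.enumerate cs).foldl (pvStepA cs) ([], (0 : Int))
  (st.1 ++ [PySem.List.slice cs (some st.2) (some (cs.length : Int))]).map String.ofList

-- ===== PORT B =====
-- one iteration of B's loop: state = (parts, cur); cur[-1] is pyGet? cur (-1) (only read when cur ≠ "")
def pvStepB (s : List (List Char) × List Char) (c : Char) : List (List Char) × List Char :=
  if PySem.Chars.isupper c && !s.2.isEmpty
      && !(((PySem.List.pyGet? s.2 (-1)).map PySem.Chars.isupper).getD false)
  then (s.1 ++ [s.2], [c])
  else (s.1, s.2 ++ [c])

def performTokenization_alt (label : String) : List String :=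
  let st := label.toList.foldl pvStepB ([], ([] : List Char))
  (st.1 ++ [st.2]).map String.ofList

-- ===== PRECONDITION & SPEC =====
def Spec_performTokenization (label : String) (out : List String) : Prop := out = performTokenization_alt label
instance (label : String) (out : List String) : Decidable (Spec_performTokenization label out) := by unfold Spec_performTokenization; infer_instance

-- ===== CLAIM (what is proved, stated in full; the proofs are below) =====
def Claim_equal_performTokenization : Prop := ∀ (label : String), Dom_performTokenization label → Spec_performTokenization label (performTokenization label)

-- ===== LEMMAS AND PROOFS =====

lemma pyGet?_neg_one {xs : List Char} (h : xs ≠ []) :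
    PySem.List.pyGet? xs (-1) = xs.getLast? := by
  have h1 : 0 < xs.length := List.length_pos_iff.mpr h
  rw [PySem.List.pyGet?, PySem.List.pyIdx?]
  rw [if_neg (by omega), if_pos (by omega)]
  simp [List.getLast?_eq_getElem?]

lemma getLast?_drop_of_lt {l : List Char} {n : Nat} (h : n < l.length) :
    (l.drop n).getLast? = l.getLast? := by
  rw [List.getLast?_eq_getElem?, List.getLast?_eq_getElem?]
  simp only [List.getElem?_drop, List.length_drop]
  congr 1; omega

-- the loop invariant: A's (compunds, j) and B's (parts, cur) after consuming `pre`,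
-- with `suf` still to process, stay related by cur = pre.drop j
lemma loop_eq (suf : List Char) : ∀ (pre : List Char) (acc : List (List Char)) (j : Nat),
    j ≤ pre.length → (pre ≠ [] → j < pre.length) → (pre = [] → j = 0) →
    (let cs := pre ++ suf
     let rA := (PySem.List.enumerate suf (pre.length : Int)).foldl (pvStepA cs) (acc, (j : Int))
     let rB := suf.foldl pvStepB (acc, pre.drop j)
     rA.1 = rB.1 ∧ ∃ k : Nat, rA.2 = (k : Int) ∧ k ≤ cs.length ∧ (cs ≠ [] → k < cs.length) ∧
       (cs = [] → k = 0) ∧ rB.2 = cs.drop k) := by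
  induction suf with
  | nil =>
    intro pre acc j hj hlt h0
    simp only [List.append_nil, PySem.List.enumerate_nil, List.foldl_nil]
    exact ⟨trivial, j, rfl, hj, hlt, h0, rfl⟩
  | cons c suf ih =>
    intro pre acc j hj hlt h0
    rw [PySem.List.enumerate_cons]
    simp only [List.foldl_cons]
    have hdrop : pre.drop j ++ [c] = (pre ++ [c]).drop j := by
      rw [List.drop_append_of_le_length hj]
    -- in the three "continue" situations both loops keep the accumulator and extend the part
    by_cases hup : PySem.Chars.isupper c = true
    · by_cases hpre : pre = []
      · -- i == 0 : A continues, B appends c to the empty cur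
        have hj0 : j = 0 := h0 hpre
        have hA : pvStepA (pre ++ c :: suf) (acc, (j : Int)) ((pre.length : Int), c)
            = (acc, (j : Int)) := by
          simp [pvStepA, hup, hpre]
        have hB : pvStepB (acc, pre.drop j) c = (acc, pre.drop j ++ [c]) := by
          simp [pvStepB, hpre, hj0]
        rw [hA, hB, hdrop]
        have h2 := ih (pre ++ [c]) acc j (by simp; omega) (by simp; omega) (by simp)
        simpa only [List.append_assoc, List.singleton_append, List.length_append,
          List.length_cons, List.length_nil, Nat.cast_add, Nat.cast_one] using h2
      · -- i ≥ 1 : compare label[i-1] with cur[-1]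
        have hjlt : j < pre.length := hlt hpre
        have hlen : 0 < pre.length := List.length_pos_iff.mpr hpre
        have hcurne : pre.drop j ≠ [] := by
          intro h
          have := congrArg List.length h
          simp only [List.length_drop, List.length_nil] at this
          omega
        -- A reads label[i-1] = pre.getLast?; B reads cur[-1] = (pre.drop j).getLast?
        have hprev : PySem.List.pyGet? (pre ++ c :: suf) ((pre.length : Int) - 1)
            = pre.getLast? := by
          have he : ((pre.length : Int) - 1) = ((pre.length - 1 : Nat) : Int) := by omega
          rw [he, PySem.List.pyGet?_natCast]
          rw [List.getElem?_append_left (by omega)]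
          rw [List.getLast?_eq_getElem?]
        have hprevB : PySem.List.pyGet? (pre.drop j) (-1) = pre.getLast? := by
          rw [pyGet?_neg_one hcurne, getLast?_drop_of_lt hjlt]
        by_cases hpu : (((pre.getLast?).map PySem.Chars.isupper).getD false) = true
        · -- acronym continuation: both keep the part growing
          have hA : pvStepA (pre ++ c :: suf) (acc, (j : Int)) ((pre.length : Int), c)
              = (acc, (j : Int)) := by
            simp only [pvStepA, hup, if_true, hprev]
            rw [if_neg (by simp; omega), if_pos hpu]
          have hB : pvStepB (acc, pre.drop j) c = (acc, pre.drop j ++ [c]) := by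
            simp only [pvStepB, hup, hprevB, hpu]
            simp
          rw [hA, hB, hdrop]
          have h2 := ih (pre ++ [c]) acc j (by simp; omega) (by simp; omega) (by simp)
          simpa only [List.append_assoc, List.singleton_append, List.length_append,
            List.length_cons, List.length_nil, Nat.cast_add, Nat.cast_one] using h2
        · -- boundary: A appends the slice label[j:i], B appends cur; both restart at c
          have hslice : PySem.List.slice (pre ++ c :: suf) (some ((j : Nat) : Int)) (some (pre.length : Int))
              = pre.drop j := by
            rw [PySem.List.slice_toNat (pre ++ c :: suf) (Int.natCast_nonneg j) (Int.natCast_nonneg pre.length)]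
            simp only [Int.toNat_natCast, List.drop_append_of_le_length hj]
            rw [List.take_append_of_le_length (by simp)]
            exact List.take_of_length_le (by simp)
          have hA : pvStepA (pre ++ c :: suf) (acc, (j : Int)) ((pre.length : Int), c)
              = (acc ++ [pre.drop j], (pre.length : Int)) := by
            simp only [pvStepA, hup, if_true, hprev]
            rw [if_neg (by simp; omega), if_neg hpu, hslice]
          have hB : pvStepB (acc, pre.drop j) c = (acc ++ [pre.drop j], [c]) := by
            simp only [pvStepB, hup, hprevB]
            simp [hcurne, hpu]
          rw [hA, hB]
          have h1c : [c] = (pre ++ [c]).drop pre.length := by simp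
          rw [h1c]
          have h2 := ih (pre ++ [c]) (acc ++ [pre.drop j]) pre.length
            (by simp) (by simp) (by simp)
          simpa only [List.append_assoc, List.singleton_append, List.length_append,
            List.length_cons, List.length_nil, Nat.cast_add, Nat.cast_one] using h2
    · -- non-uppercase char: both just extend
      have hA : pvStepA (pre ++ c :: suf) (acc, (j : Int)) ((pre.length : Int), c)
          = (acc, (j : Int)) := by
        simp [pvStepA, hup]
      have hB : pvStepB (acc, pre.drop j) c = (acc, pre.drop j ++ [c]) := by
        simp [pvStepB, hup]
      rw [hA, hB, hdrop]
      have h2 := ih (pre ++ [c]) acc j (by simp; omega) (by simp; omega) (by simp)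
      simpa only [List.append_assoc, List.singleton_append, List.length_append,
        List.length_cons, List.length_nil, Nat.cast_add, Nat.cast_one] using h2

-- ===== VERDICT (by name: the statement is the Claim_ definition above) =====
theorem performTokenization_spec : Claim_equal_performTokenization := by
  intro label _
  simp only [Spec_performTokenization, performTokenization, performTokenization_alt]
  have h := loop_eq label.toList [] [] 0 (by simp) (by simp) (by simp)
  simp only [List.nil_append, Nat.cast_zero, List.length_nil, List.drop_zero] at h
  obtain ⟨h1, k, hk, hkle, _, _, hcur⟩ := h
  simp only [h1, hk, hcur]
  rw [PySem.List.slice_toNat label.toList (Int.natCast_nonneg k) (Int.natCast_nonneg _)]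
  simp only [Int.toNat_natCast]
  rw [List.take_of_length_le (by simp only [List.length_drop, le_refl])]
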